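-- pv_equiv track=rewrite | github.com/goguava-ai/guava-starter | examples/integrations/waystar/eligibility_verification/__main__.py | extract_coverage_summary
-- ===== SOURCE A (Python) =====
-- def extract_coverage_summary(response: dict) -> dict:
--     """Pulls key coverage data from the Waystar eligibility response."""
--     summary = {
--         "status": "unknown",
--         "plan_name": "",
--         "group_number": "",
--         "copay": "",
--         "deductible": "",
--         "deductible_met": "",
--         "out_of_pocket_max": "",
--         "out_of_pocket_met": "",
--     }
--     coverage = response.get("coverages", [])
--     for cov in coverage:
--         cov_type = cov.get("coverageType", "")
--         if cov_type == "ACTIVE":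
--             summary["status"] = "active"
--             summary["plan_name"] = cov.get("planDescription", "")
--             summary["group_number"] = cov.get("groupNumber", "")
--         elif cov_type == "COPAY":
--             summary["copay"] = cov.get("amount", "")
--         elif cov_type == "DEDUCTIBLE":
--             summary["deductible"] = cov.get("totalAmount", "")
--             summary["deductible_met"] = cov.get("amountMet", "")
--         elif cov_type == "OUT_OF_POCKET":
--             summary["out_of_pocket_max"] = cov.get("totalAmount", "")
--             summary["out_of_pocket_met"] = cov.get("amountMet", "")
--     if not any(cov.get("coverageType") == "ACTIVE" for cov in coverage):
--         summary["status"] = "inactive or not found"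
--     return summary
-- ===== SOURCE B (Python) =====
-- def extract_coverage_summary(response: dict) -> dict:
--     """Index coverages by type (last occurrence wins), then fill the summary by direct lookups."""
--     by_type = {}
--     for cov in response.get("coverages", []):
--         by_type[cov.get("coverageType", "")] = cov
--
--     def field(cov_type, key):
--         cov = by_type.get(cov_type)
--         return cov.get(key, "") if cov is not None else ""
--
--     return {
--         "status": "active" if "ACTIVE" in by_type else "inactive or not found",
--         "plan_name": field("ACTIVE", "planDescription"),
--         "group_number": field("ACTIVE", "groupNumber"),
--         "copay": field("COPAY", "amount"),
--         "deductible": field("DEDUCTIBLE", "totalAmount"),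
--         "deductible_met": field("DEDUCTIBLE", "amountMet"),
--         "out_of_pocket_max": field("OUT_OF_POCKET", "totalAmount"),
--         "out_of_pocket_met": field("OUT_OF_POCKET", "amountMet"),
--     }
-- ===== Notes on version B (the rewrite author's own statement) =====
-- stated objective: simpler
-- what changed: Replaces the mutate-as-you-scan if/elif dispatch with building a last-wins index of coverages by coverageType and filling the summary by direct lookups.
import Mathlib
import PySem

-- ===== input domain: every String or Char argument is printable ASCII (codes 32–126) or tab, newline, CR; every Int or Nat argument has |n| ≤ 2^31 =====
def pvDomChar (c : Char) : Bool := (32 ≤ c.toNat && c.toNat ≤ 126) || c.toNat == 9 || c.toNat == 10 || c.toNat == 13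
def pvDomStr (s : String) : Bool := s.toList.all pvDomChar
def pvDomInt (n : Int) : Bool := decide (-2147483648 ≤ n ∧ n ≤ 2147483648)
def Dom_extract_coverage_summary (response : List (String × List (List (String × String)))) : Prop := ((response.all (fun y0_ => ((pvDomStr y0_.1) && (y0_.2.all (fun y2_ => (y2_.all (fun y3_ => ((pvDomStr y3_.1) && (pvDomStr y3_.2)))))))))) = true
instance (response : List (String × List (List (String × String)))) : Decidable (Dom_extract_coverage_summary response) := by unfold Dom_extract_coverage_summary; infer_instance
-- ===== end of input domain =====

-- B indexes coverages by coverageType (last wins) and fills the summary by lookups; equivalence is about the return value only.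

-- shared Python-semantics helpers: dict.get with / without default over an association list (first match)
def covGet? (cov : List (String × String)) (k : String) : Option String :=
  match cov with
  | [] => none
  | (k', v) :: rest => if k' == k then some v else covGet? rest k

def covGetD (cov : List (String × String)) (k dflt : String) : String :=
  match cov with
  | [] => dflt
  | (k', v) :: rest => if k' == k then v else covGetD rest k dflt

def respGetD (response : List (String × List (List (String × String)))) :
    List (List (String × String)) :=
  match response with
  | [] => []
  | (k', v) :: rest => if k' == "coverages" then v else respGetD rest

-- ===== PORT A =====
-- A's summary dict has a fixed key set; it is ported as a structure with one field per key.
structure CovSummary where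
  status : String
  plan_name : String
  group_number : String
  copay : String
  deductible : String
  deductible_met : String
  out_of_pocket_max : String
  out_of_pocket_met : String
deriving Repr, DecidableEq

def stepA (s : CovSummary) (cov : List (String × String)) : CovSummary :=
  let cov_type := covGetD cov "coverageType" ""
  if cov_type == "ACTIVE" then
    { s with status := "active",
             plan_name := covGetD cov "planDescription" "",
             group_number := covGetD cov "groupNumber" "" }
  else if cov_type == "COPAY" then
    { s with copay := covGetD cov "amount" "" }
  else if cov_type == "DEDUCTIBLE" then
    { s with deductible := covGetD cov "totalAmount" "",
             deductible_met := covGetD cov "amountMet" "" }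
  else if cov_type == "OUT_OF_POCKET" then
    { s with out_of_pocket_max := covGetD cov "totalAmount" "",
             out_of_pocket_met := covGetD cov "amountMet" "" }
  else s

def extract_coverage_summary (response : List (String × List (List (String × String)))) :
    List (String × String) :=
  let coverage := respGetD response
  let s := coverage.foldl stepA ⟨"unknown", "", "", "", "", "", "", ""⟩
  let s := if !(coverage.any (fun cov => covGet? cov "coverageType" == some "ACTIVE")) then
             { s with status := "inactive or not found" }
           else s
  [("status", s.status), ("plan_name", s.plan_name), ("group_number", s.group_number),
   ("copay", s.copay), ("deductible", s.deductible), ("deductible_met", s.deductible_met),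
   ("out_of_pocket_max", s.out_of_pocket_max), ("out_of_pocket_met", s.out_of_pocket_met)]

-- ===== PORT B =====
def stepB (d : PySem.Dict String (List (String × String))) (cov : List (String × String)) :
    PySem.Dict String (List (String × String)) :=
  d.insert (covGetD cov "coverageType" "") cov

def fieldB (d : PySem.Dict String (List (String × String))) (covType key : String) : String :=
  match d.get? covType with
  | some cov => covGetD cov key ""
  | none => ""

def extract_coverage_summary_alt (response : List (String × List (List (String × String)))) :
    List (String × String) :=
  let by_type := (respGetD response).foldl stepB PySem.Dict.empty
  [("status", if by_type.contains "ACTIVE" then "active" else "inactive or not found"),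
   ("plan_name", fieldB by_type "ACTIVE" "planDescription"),
   ("group_number", fieldB by_type "ACTIVE" "groupNumber"),
   ("copay", fieldB by_type "COPAY" "amount"),
   ("deductible", fieldB by_type "DEDUCTIBLE" "totalAmount"),
   ("deductible_met", fieldB by_type "DEDUCTIBLE" "amountMet"),
   ("out_of_pocket_max", fieldB by_type "OUT_OF_POCKET" "totalAmount"),
   ("out_of_pocket_met", fieldB by_type "OUT_OF_POCKET" "amountMet")]

-- ===== PRECONDITION & SPEC =====
def Spec_extract_coverage_summary (response : List (String × List (List (String × String)))) (out : List (String × String)) : Prop := out = extract_coverage_summary_alt response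
instance (response : List (String × List (List (String × String)))) (out : List (String × String)) : Decidable (Spec_extract_coverage_summary response out) := by unfold Spec_extract_coverage_summary; infer_instance

-- ===== CLAIM (what is proved, stated in full; the proofs are below) =====
def Claim_equal_extract_coverage_summary : Prop := ∀ (response : List (String × List (List (String × String)))), Dom_extract_coverage_summary response → Spec_extract_coverage_summary response (extract_coverage_summary response)

-- ===== LEMMAS AND PROOFS =====

-- cov.get("coverageType") == "ACTIVE" iff cov.get("coverageType","") == "ACTIVE"
lemma covGet?_active (cov : List (String × String)) :
    (covGet? cov "coverageType" == some "ACTIVE") = (covGetD cov "coverageType" "" == "ACTIVE") := by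
  induction cov with
  | nil => simp [covGet?, covGetD]
  | cons p rest ih =>
    simp only [covGet?, covGetD]
    split_ifs with h
    · rfl
    · exact ih

lemma fieldB_insert (d : PySem.Dict String (List (String × String))) (t K k : String)
    (c : List (String × String)) :
    fieldB (d.insert t c) K k = if K = t then covGetD c k "" else fieldB d K k := by
  simp only [fieldB, PySem.Dict.get?_insert]
  split_ifs <;> rfl

-- how stepA acts on each field, phrased by the coverage type
lemma stepA_status (s : CovSummary) (c : List (String × String)) :
    (stepA s c).status = if covGetD c "coverageType" "" = "ACTIVE" then "active" else s.status := by
  simp only [stepA]; split_ifs with h1 h2 h3 h4 <;> simp_all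

lemma stepA_plan (s : CovSummary) (c : List (String × String)) :
    (stepA s c).plan_name = if covGetD c "coverageType" "" = "ACTIVE" then covGetD c "planDescription" "" else s.plan_name := by
  simp only [stepA]; split_ifs with h1 h2 h3 h4 <;> simp_all

lemma stepA_group (s : CovSummary) (c : List (String × String)) :
    (stepA s c).group_number = if covGetD c "coverageType" "" = "ACTIVE" then covGetD c "groupNumber" "" else s.group_number := by
  simp only [stepA]; split_ifs with h1 h2 h3 h4 <;> simp_all

lemma stepA_copay (s : CovSummary) (c : List (String × String)) :
    (stepA s c).copay = if covGetD c "coverageType" "" = "COPAY" then covGetD c "amount" "" else s.copay := by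
  simp only [stepA]; split_ifs with h1 h2 h3 h4 <;> simp_all

lemma stepA_ded (s : CovSummary) (c : List (String × String)) :
    (stepA s c).deductible = if covGetD c "coverageType" "" = "DEDUCTIBLE" then covGetD c "totalAmount" "" else s.deductible := by
  simp only [stepA]; split_ifs with h1 h2 h3 h4 <;> simp_all

lemma stepA_dedm (s : CovSummary) (c : List (String × String)) :
    (stepA s c).deductible_met = if covGetD c "coverageType" "" = "DEDUCTIBLE" then covGetD c "amountMet" "" else s.deductible_met := by
  simp only [stepA]; split_ifs with h1 h2 h3 h4 <;> simp_all

lemma stepA_oopm (s : CovSummary) (c : List (String × String)) :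
    (stepA s c).out_of_pocket_max = if covGetD c "coverageType" "" = "OUT_OF_POCKET" then covGetD c "totalAmount" "" else s.out_of_pocket_max := by
  simp only [stepA]; split_ifs with h1 h2 h3 h4 <;> simp_all

lemma stepA_oopt (s : CovSummary) (c : List (String × String)) :
    (stepA s c).out_of_pocket_met = if covGetD c "coverageType" "" = "OUT_OF_POCKET" then covGetD c "amountMet" "" else s.out_of_pocket_met := by
  simp only [stepA]; split_ifs with h1 h2 h3 h4 <;> simp_all

-- the main invariant: A's fold state is determined by B's last-wins index
lemma fold_invariant (cs : List (List (String × String))) (s : CovSummary)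
    (d : PySem.Dict String (List (String × String)))
    (hst : s.status = if (d.get? "ACTIVE").isSome then "active" else "unknown")
    (hpn : s.plan_name = fieldB d "ACTIVE" "planDescription")
    (hgn : s.group_number = fieldB d "ACTIVE" "groupNumber")
    (hcp : s.copay = fieldB d "COPAY" "amount")
    (hdd : s.deductible = fieldB d "DEDUCTIBLE" "totalAmount")
    (hdm : s.deductible_met = fieldB d "DEDUCTIBLE" "amountMet")
    (hom : s.out_of_pocket_max = fieldB d "OUT_OF_POCKET" "totalAmount")
    (hot : s.out_of_pocket_met = fieldB d "OUT_OF_POCKET" "amountMet") :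
    (cs.foldl stepA s = { status := if ((cs.foldl stepB d).get? "ACTIVE").isSome then "active" else "unknown",
                          plan_name := fieldB (cs.foldl stepB d) "ACTIVE" "planDescription",
                          group_number := fieldB (cs.foldl stepB d) "ACTIVE" "groupNumber",
                          copay := fieldB (cs.foldl stepB d) "COPAY" "amount",
                          deductible := fieldB (cs.foldl stepB d) "DEDUCTIBLE" "totalAmount",
                          deductible_met := fieldB (cs.foldl stepB d) "DEDUCTIBLE" "amountMet",
                          out_of_pocket_max := fieldB (cs.foldl stepB d) "OUT_OF_POCKET" "totalAmount",
                          out_of_pocket_met := fieldB (cs.foldl stepB d) "OUT_OF_POCKET" "amountMet" }) := by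
  induction cs generalizing s d with
  | nil =>
    simp only [List.foldl_nil]
    cases s
    simp_all
  | cons c rest ih =>
    simp only [List.foldl_cons]
    apply ih
    · rw [stepA_status]
      show _ = if (((d.insert (covGetD c "coverageType" "") c)).get? "ACTIVE").isSome then _ else _
      rw [PySem.Dict.get?_insert]
      by_cases h : covGetD c "coverageType" "" = "ACTIVE"
      · simp [h]
      · simp [h, Ne.symm h, hst]
    · rw [stepA_plan]
      show _ = fieldB (d.insert (covGetD c "coverageType" "") c) "ACTIVE" "planDescription"
      rw [fieldB_insert]
      by_cases h : covGetD c "coverageType" "" = "ACTIVE"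
      · simp [h]
      · simp [h, Ne.symm h, hpn]
    · rw [stepA_group]
      show _ = fieldB (d.insert (covGetD c "coverageType" "") c) "ACTIVE" "groupNumber"
      rw [fieldB_insert]
      by_cases h : covGetD c "coverageType" "" = "ACTIVE"
      · simp [h]
      · simp [h, Ne.symm h, hgn]
    · rw [stepA_copay]
      show _ = fieldB (d.insert (covGetD c "coverageType" "") c) "COPAY" "amount"
      rw [fieldB_insert]
      by_cases h : covGetD c "coverageType" "" = "COPAY"
      · simp [h]
      · simp [h, Ne.symm h, hcp]
    · rw [stepA_ded]
      show _ = fieldB (d.insert (covGetD c "coverageType" "") c) "DEDUCTIBLE" "totalAmount"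
      rw [fieldB_insert]
      by_cases h : covGetD c "coverageType" "" = "DEDUCTIBLE"
      · simp [h]
      · simp [h, Ne.symm h, hdd]
    · rw [stepA_dedm]
      show _ = fieldB (d.insert (covGetD c "coverageType" "") c) "DEDUCTIBLE" "amountMet"
      rw [fieldB_insert]
      by_cases h : covGetD c "coverageType" "" = "DEDUCTIBLE"
      · simp [h]
      · simp [h, Ne.symm h, hdm]
    · rw [stepA_oopm]
      show _ = fieldB (d.insert (covGetD c "coverageType" "") c) "OUT_OF_POCKET" "totalAmount"
      rw [fieldB_insert]
      by_cases h : covGetD c "coverageType" "" = "OUT_OF_POCKET"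
      · simp [h]
      · simp [h, Ne.symm h, hom]
    · rw [stepA_oopt]
      show _ = fieldB (d.insert (covGetD c "coverageType" "") c) "OUT_OF_POCKET" "amountMet"
      rw [fieldB_insert]
      by_cases h : covGetD c "coverageType" "" = "OUT_OF_POCKET"
      · simp [h]
      · simp [h, Ne.symm h, hot]

-- any-scan for ACTIVE equals presence in B's index
lemma any_active_eq (cs : List (List (String × String)))
    (d : PySem.Dict String (List (String × String))) :
    (d.contains "ACTIVE" || cs.any (fun cov => covGet? cov "coverageType" == some "ACTIVE"))
      = (cs.foldl stepB d).contains "ACTIVE" := by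
  induction cs generalizing d with
  | nil => simp
  | cons c rest ih =>
    simp only [List.any_cons, List.foldl_cons]
    rw [← ih]
    simp only [stepB, PySem.Dict.contains_insert, covGet?_active]
    by_cases h : covGetD c "coverageType" "" = "ACTIVE"
    · simp [h]
    · simp [beq_eq_false_iff_ne.mpr h, beq_eq_false_iff_ne.mpr (Ne.symm h)]

-- ===== VERDICT (by name: the statement is the Claim_ definition above) =====
theorem extract_coverage_summary_spec : Claim_equal_extract_coverage_summary := by
  intro response _
  unfold Spec_extract_coverage_summary extract_coverage_summary extract_coverage_summary_alt
  have hmain := fold_invariant (respGetD response) ⟨"unknown", "", "", "", "", "", "", ""⟩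
    PySem.Dict.empty (by simp [PySem.Dict.get?_empty]) (by simp [fieldB, PySem.Dict.get?_empty])
    (by simp [fieldB, PySem.Dict.get?_empty]) (by simp [fieldB, PySem.Dict.get?_empty])
    (by simp [fieldB, PySem.Dict.get?_empty]) (by simp [fieldB, PySem.Dict.get?_empty])
    (by simp [fieldB, PySem.Dict.get?_empty]) (by simp [fieldB, PySem.Dict.get?_empty])
  have hany := any_active_eq (respGetD response) PySem.Dict.empty
  simp only [PySem.Dict.contains_empty, Bool.false_or] at hany
  rw [PySem.Dict.contains_eq_isSome_get?] at hany
  simp only [hmain]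
  rw [← hany]
  cases hb : (respGetD response).any (fun cov => covGet? cov "coverageType" == some "ACTIVE") <;>
    simp [hb] <;> (rw [PySem.Dict.contains_eq_isSome_get?, ← hany]; exact hb)
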